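-- pv_equiv track=rewrite | github.com/siisee11/SW | samsung/tetromino.py | convolution2d
-- ===== SOURCE A (Python) =====
-- def dot(mat, kernel):
--     y, x = len(mat), len(mat[0])
--     ret = 0
--     for i in range(y):
--         for j in range(x):
--             ret += mat[i][j] * kernel[i][j]
--     return ret
--
-- def convolution2d(image, kernel):
--     m, n = len(kernel), len(kernel[0])
--     y, x = len(image), len(image[0])
--     y = y - m + 1
--     x = x - n + 1
--     max = 0
--     for i in range(y):
--         for j in range(x):
--             sub = [x[j:j+n] for x in image[i:i+m]]
--             sum = dot(sub, kernel)
--             max = sum if sum > max else max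
--
--     return max
-- ===== SOURCE B (Python) =====
-- def convolution2d(image, kernel):
--     m, n = len(kernel), len(kernel[0])
--     y = len(image) - m + 1
--     x = len(image[0]) - n + 1
--     if y <= 0 or x <= 0:
--         return 0
--     acc = [[0 for _ in range(x)] for _ in range(y)]
--     for a, krow in enumerate(kernel):
--         for b, kv in enumerate(krow[:n]):
--             for i in range(y):
--                 row = image[i + a]
--                 for j in range(x):
--                     acc[i][j] += row[j + b] * kv
--     best = 0
--     for row in acc:
--         for v in row:
--             if v > best:
--                 best = v
--     return best
-- ===== Notes on version B (the rewrite author's own statement) =====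
-- stated objective: alternative
-- what changed: Replaces A's gather (for each output position, materialize the m x n sub-matrix by slicing and call dot) with a scatter: a zero-initialized y-by-x accumulator grid to which each kernel cell's weighted image contribution is added in an outer loop over kernel cells, followed by a max-against-0 scan of the grid; no sub-matrices or dot helper at all.
-- outside the precondition, e.g. on convolution2d([[1, 2, 3], [4, 5]], [[1, 1]]): A returns 9, B raises IndexError
import Mathlib
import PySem

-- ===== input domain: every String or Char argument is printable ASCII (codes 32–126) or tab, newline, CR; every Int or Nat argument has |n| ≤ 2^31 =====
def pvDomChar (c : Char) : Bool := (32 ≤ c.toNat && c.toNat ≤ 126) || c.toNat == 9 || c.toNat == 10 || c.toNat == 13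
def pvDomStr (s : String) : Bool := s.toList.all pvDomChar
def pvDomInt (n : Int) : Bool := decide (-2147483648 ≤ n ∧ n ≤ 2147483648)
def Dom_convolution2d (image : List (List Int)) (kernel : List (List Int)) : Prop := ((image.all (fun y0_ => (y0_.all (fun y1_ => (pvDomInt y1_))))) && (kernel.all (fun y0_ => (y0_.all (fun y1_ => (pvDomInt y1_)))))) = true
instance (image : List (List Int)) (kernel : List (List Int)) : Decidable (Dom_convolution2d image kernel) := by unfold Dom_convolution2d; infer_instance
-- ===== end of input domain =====

-- B replaces A's per-position sub-matrix slicing + dot (gather) by a scatter: an accumulator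
-- grid updated once per kernel cell, then a max-against-0 scan; same asymptotic cost ("alternative").


-- ===== PORT A =====
-- dot(mat, kernel): mat[0] is .headI and the indexings are pyGetD with a default — Pre_ keeps every
-- call site non-empty and in range, exactly where the Python dot returns without IndexError.
def dotA (mat : List (List Int)) (kernel : List (List Int)) : Int :=
  let y : Int := mat.length
  let x : Int := (mat.headI).length
  (PySem.List.pyRange 0 y 1).foldl (fun ret i =>
    (PySem.List.pyRange 0 x 1).foldl (fun ret j =>
      ret + PySem.List.pyGetD (PySem.List.pyGetD mat i []) j 0 *
            PySem.List.pyGetD (PySem.List.pyGetD kernel i []) j 0) ret) 0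

-- kernel[0] / image[0] are .headI (Pre_ demands both lists non-empty, where Python indexes them).
def convolution2d (image : List (List Int)) (kernel : List (List Int)) : Int :=
  let m : Int := kernel.length
  let n : Int := (kernel.headI).length
  let y : Int := (image.length : Int) - m + 1
  let x : Int := ((image.headI).length : Int) - n + 1
  (PySem.List.pyRange 0 y 1).foldl (fun mx i =>
    (PySem.List.pyRange 0 x 1).foldl (fun mx j =>
      let sub := (PySem.List.slice image (some i) (some (i + m))).map
                   (fun r => PySem.List.slice r (some j) (some (j + n)))
      let s := dotA sub kernel
      if s > mx then s else mx) mx) 0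

-- ===== PORT B =====
-- Source B's i/j loops write acc[i][j] += row[j+b]*kv once per cell of the y-by-x grid acc, in the
-- same row-major order; they are transcribed as an indexed map over acc (whose shape is y-by-x).
def convolution2d_alt (image : List (List Int)) (kernel : List (List Int)) : Int :=
  let m : Int := kernel.length
  let n : Int := (kernel.headI).length
  let y : Int := (image.length : Int) - m + 1
  let x : Int := ((image.headI).length : Int) - n + 1
  if y ≤ 0 ∨ x ≤ 0 then 0
  else
    let acc0 : List (List Int) :=
      (PySem.List.pyRange 0 y 1).map (fun _ => (PySem.List.pyRange 0 x 1).map (fun _ => (0 : Int)))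
    let acc := (PySem.List.enumerate kernel 0).foldl (fun acc pa =>
      (PySem.List.enumerate (PySem.List.slice pa.2 none (some n)) 0).foldl (fun acc pb =>
        acc.mapIdx (fun i row => row.mapIdx (fun j v =>
          v + PySem.List.pyGetD (PySem.List.pyGetD image ((i : Int) + pa.1) []) ((j : Int) + pb.1) 0 * pb.2))) acc) acc0
    acc.foldl (fun best row => row.foldl (fun best v => if v > best then v else best) best) 0

-- ===== PRECONDITION & SPEC =====
-- Pre_ excludes empty image/kernel (A raises IndexError on kernel[0]/image[0]) and ragged inputs
-- whose rows are shorter than their first row while a non-degenerate kernel fits inside the image,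
-- on which A either raises IndexError inside dot or silently convolves clipped windows (and B raises).
def Pre_convolution2d (image : List (List Int)) (kernel : List (List Int)) : Prop :=
  image ≠ [] ∧ kernel ≠ [] ∧
  (image.length < kernel.length ∨ (image.headI).length < (kernel.headI).length ∨
    (kernel.headI).length = 0 ∨
    ((∀ r ∈ image, (image.headI).length ≤ r.length) ∧
     (∀ r ∈ kernel, (kernel.headI).length ≤ r.length)))
instance (image : List (List Int)) (kernel : List (List Int)) : Decidable (Pre_convolution2d image kernel) := by unfold Pre_convolution2d; infer_instance

def pvWitness_convolution2d : List (List Int) × List (List Int) := ([[1, 2], [3, -4]], [[2]])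

def Spec_convolution2d (image : List (List Int)) (kernel : List (List Int)) (out : Int) : Prop := out = convolution2d_alt image kernel
instance (image : List (List Int)) (kernel : List (List Int)) (out : Int) : Decidable (Spec_convolution2d image kernel out) := by unfold Spec_convolution2d; infer_instance

-- ===== CLAIM (what is proved, stated in full; the proofs are below) =====
def Claim_equal_convolution2d : Prop := ∀ (image : List (List Int)) (kernel : List (List Int)), Dom_convolution2d image kernel → Pre_convolution2d image kernel → Spec_convolution2d image kernel (convolution2d image kernel)

-- ===== LEMMAS AND PROOFS =====
def Sconv (image kernel : List (List Int)) (i j : Nat) : Int :=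
  ((List.range kernel.length).map (fun a =>
    ((List.range (kernel.headI).length).map (fun b =>
      (image.getD (i+a) []).getD (j+b) 0 * (kernel.getD a []).getD b 0)).sum)).sum

lemma sub_row (image : List (List Int)) (k j a M N : Nat)
    (ha : a < M) (hkM : k + M ≤ image.length) :
    (((image.drop k).take M).map (fun r => (r.drop j).take N)).getD a []
      = ((image[k+a]'(by omega)).drop j).take N := by
  have hka : k + a < image.length := by omega
  rw [List.getD_eq_getElem?_getD, List.getElem?_map, List.getElem?_take_of_lt ha,
    List.getElem?_drop]
  simp [List.getElem?_eq_getElem hka]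

lemma dotA_eq_Sconv (image kernel : List (List Int)) (k j : Nat)
    (hM : 0 < kernel.length)
    (hkM : k + kernel.length ≤ image.length)
    (hjN : j + (kernel.headI).length ≤ (image.headI).length)
    (hrows : ∀ r ∈ image, (image.headI).length ≤ r.length) :
    dotA (((image.drop k).take kernel.length).map (fun r => (r.drop j).take (kernel.headI).length)) kernel
      = Sconv image kernel k j := by
  set M := kernel.length with hMdef
  set N := (kernel.headI).length with hNdef
  set mat := ((image.drop k).take M).map (fun r => (r.drop j).take N) with hmat
  have hk0 : k < image.length := by omega
  have hlen : mat.length = M := by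
    simp [hmat, List.length_take, List.length_drop]; omega
  have hrow0 : (image.headI).length ≤ image[k].length :=
    hrows _ (List.getElem_mem hk0)
  have hheadmat : mat.headI = (image[k].drop j).take N := by
    have hne : mat ≠ [] := by
      intro h; rw [h] at hlen; simp at hlen; omega
    have : mat.headI = mat.getD 0 [] := by
      cases mat with
      | nil => rfl
      | cons h t => simp
    rw [this, hmat, sub_row image k j 0 M N hM hkM]
    simp
  have hheadlen : mat.headI.length = N := by
    rw [hheadmat]; simp [List.length_take, List.length_drop]; omega
  have entry : ∀ a < M, ∀ b < N,
      ((mat.getD a []).getD b 0) = (image.getD (k+a) []).getD (j+b) 0 := by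
    intro a ha b hb
    have hka : k + a < image.length := by omega
    have hrowa : (image.headI).length ≤ image[k+a].length :=
      hrows _ (List.getElem_mem hka)
    have h2 : image.getD (k+a) [] = image[k+a] := by
      rw [List.getD_eq_getElem?_getD]; simp [List.getElem?_eq_getElem hka]
    rw [hmat, sub_row image k j a M N ha hkM, h2,
      List.getD_eq_getElem?_getD, List.getElem?_take_of_lt hb, List.getElem?_drop,
      List.getD_eq_getElem?_getD]
  show dotA mat kernel = _
  simp only [dotA, hlen, hheadlen]
  simp only [PySem.List.foldl_add, zero_add, PySem.List.pyRange_zero_nat, List.map_map,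
    Function.comp_def]
  unfold Sconv
  rw [← hMdef, ← hNdef]
  apply congrArg List.sum
  apply List.map_congr_left
  intro a hamem
  have ha : a < M := List.mem_range.mp hamem
  apply congrArg List.sum
  apply List.map_congr_left
  intro b hbmem
  have hb : b < N := List.mem_range.mp hbmem
  simp only [PySem.List.pyGetD_natCast]
  rw [entry a ha b hb]

lemma foldl_nested {α β γ : Type} (L : List α) (g : α → List β) (u : γ → α → β → γ) (init : γ) :
    L.foldl (fun acc pa => (g pa).foldl (fun acc pb => u acc pa pb) acc) init
      = (L.flatMap (fun pa => (g pa).map (fun pb => (pa, pb)))).foldl (fun acc q => u acc q.1 q.2) init := by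
  induction L generalizing init with
  | nil => rfl
  | cons h t ih => simp only [List.foldl_cons, List.flatMap_cons, List.foldl_append,
      List.foldl_map, ih]

lemma mapIdx_id' {α : Type} (l : List α) : l.mapIdx (fun _ v => v) = l := by
  apply List.ext_getElem
  · simp
  · intro n h1 h2; simp [List.getElem_mapIdx]

lemma foldl_mapIdx2_add {γ : Type} (P : List γ) (w : Nat → Nat → γ → Int) (acc : List (List Int)) :
    P.foldl (fun acc q => acc.mapIdx (fun i row => row.mapIdx (fun j v => v + w i j q))) acc
      = acc.mapIdx (fun i row => row.mapIdx (fun j v => v + (P.map (w i j)).sum)) := by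
  induction P generalizing acc with
  | nil => simp [mapIdx_id']
  | cons q P ih =>
    rw [List.foldl_cons, ih]
    simp only [List.mapIdx_mapIdx, Function.comp_def, List.map_cons, List.sum_cons, add_assoc]

lemma zero_row (x : Nat) (t : Nat → Int) :
    (List.replicate x (0:Int)).mapIdx (fun j v => v + t j)
      = (List.range x).map t := by
  apply List.ext_getElem
  · simp
  · intro n h1 h2
    simp [List.getElem_mapIdx]

lemma mapIdx_grid (y x : Nat) (T : Nat → Nat → Int) :
    (((List.range y).map (fun _ => (List.range x).map (fun _ => (0:Int)))).mapIdx
      (fun i row => row.mapIdx (fun j v => v + T i j)))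
      = (List.range y).map (fun i => (List.range x).map (fun j => T i j)) := by
  apply List.ext_getElem
  · simp
  · intro n h1 h2
    simp [List.getElem_mapIdx, zero_row]

lemma scan_grid (y x : Nat) (T : Nat → Nat → Int) :
    ((List.range y).map (fun i => (List.range x).map (fun j => T i j))).foldl
      (fun best row => row.foldl (fun best v => if v > best then v else best) best) 0
      = (List.range y).foldl (fun mx i =>
          (List.range x).foldl (fun mx j => if T i j > mx then T i j else mx) mx) 0 := by
  rw [List.foldl_map]
  simp only [List.foldl_map]

lemma sum_flatMap_eq {α : Type} (l : List α) (g : α → List Int) :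
    (l.flatMap g).sum = (l.map (fun a => (g a).sum)).sum := by
  induction l with
  | nil => rfl
  | cons h t ih => simp [List.flatMap_cons, ih]

lemma convInnerSum (image kernel : List (List Int)) (i j : Nat)
    (hker : ∀ r ∈ kernel, (kernel.headI).length ≤ r.length) :
    (((PySem.List.enumerate kernel 0).flatMap (fun pa =>
        (PySem.List.enumerate (PySem.List.slice pa.2 none (some ((kernel.headI).length : Int))) 0).map
          (fun pb => (pa, pb)))).map
        (fun q => PySem.List.pyGetD (PySem.List.pyGetD image ((i : Int) + q.1.1) []) ((j : Int) + q.2.1) 0 * q.2.2)).sum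
      = Sconv image kernel i j := by
  rw [List.map_flatMap, sum_flatMap_eq]
  rw [PySem.List.enumerate_eq_map_pyRange kernel ([] : List Int)]
  simp only [PySem.List.len_eq, PySem.List.pyRange_zero_nat, List.map_map]
  unfold Sconv
  apply congrArg List.sum
  apply List.map_congr_left
  intro a hamem
  have ha : a < kernel.length := List.mem_range.mp hamem
  simp only [Function.comp_def, PySem.List.pyGetD_natCast]
  have hrowa : kernel.getD a [] = kernel[a] := by
    rw [List.getD_eq_getElem?_getD]; simp [List.getElem?_eq_getElem ha]
  have hrowlen : (kernel.headI).length ≤ (kernel.getD a []).length := by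
    rw [hrowa]; exact hker _ (List.getElem_mem ha)
  rw [PySem.List.slice_to_natCast]
  have htlen : ((kernel.getD a []).take (kernel.headI).length).length = (kernel.headI).length := by
    rw [List.length_take]; exact min_eq_left hrowlen
  rw [PySem.List.enumerate_eq_map_pyRange _ (0 : Int)]
  simp only [PySem.List.len_eq, htlen, PySem.List.pyRange_zero_nat, List.map_map]
  apply congrArg List.sum
  apply List.map_congr_left
  intro b hbmem
  have hb : b < (kernel.headI).length := List.mem_range.mp hbmem
  simp only [Function.comp_def, PySem.List.pyGetD_natCast]
  have hcast1 : (i : Int) + (a : Int) = ((i + a : Nat) : Int) := by push_cast; ring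
  have hcast2 : (j : Int) + (b : Int) = ((j + b : Nat) : Int) := by push_cast; ring
  rw [hcast1, hcast2, PySem.List.pyGetD_natCast, PySem.List.pyGetD_natCast]
  simp [List.getD_eq_getElem?_getD, List.getElem?_take_of_lt hb]

lemma accEval (image kernel : List (List Int)) (y x : Nat)
    (hker : ∀ r ∈ kernel, (kernel.headI).length ≤ r.length) :
    ((PySem.List.enumerate kernel 0).foldl (fun acc pa =>
        (PySem.List.enumerate (PySem.List.slice pa.2 none (some ((kernel.headI).length : Int))) 0).foldl (fun acc pb =>
          acc.mapIdx (fun i row => row.mapIdx (fun j v =>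
            v + PySem.List.pyGetD (PySem.List.pyGetD image ((i : Int) + pa.1) []) ((j : Int) + pb.1) 0 * pb.2))) acc)
      ((List.range y).map (fun _ => (List.range x).map (fun _ => (0:Int)))))
      = (List.range y).map (fun i => (List.range x).map (fun j => Sconv image kernel i j)) := by
  rw [foldl_nested, foldl_mapIdx2_add, mapIdx_grid]
  apply List.map_congr_left
  intro i _
  apply List.map_congr_left
  intro j _
  exact convInnerSum image kernel i j hker

lemma foldl_preserve_zero {α : Type} (l : List α) (f : Int → α → Int)
    (h : ∀ a ∈ l, f 0 a = 0) : l.foldl f 0 = 0 := by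
  induction l with
  | nil => rfl
  | cons a t ih =>
    rw [List.foldl_cons, h a List.mem_cons_self]
    exact ih (fun b hb => h b (List.mem_cons_of_mem a hb))

lemma dotA_zero_width (mat kernel : List (List Int)) (h : (mat.headI).length = 0) :
    dotA mat kernel = 0 := by
  simp only [dotA, h, Nat.cast_zero, PySem.List.pyRange_one_eq_nil (le_refl 0), List.foldl_nil]
  exact PySem.List.foldl_ignore _ _

theorem main_eq (image kernel : List (List Int)) (hpre : Pre_convolution2d image kernel) :
    convolution2d image kernel = convolution2d_alt image kernel := by
  obtain ⟨hine, hkne, hdisj⟩ := hpre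
  have hM : 0 < kernel.length := List.length_pos_iff.mpr hkne
  have hY : 0 < image.length := List.length_pos_iff.mpr hine
  by_cases hy : (image.length : Int) - kernel.length + 1 ≤ 0
  · rw [convolution2d, convolution2d_alt]
    simp only [PySem.List.pyRange_one_eq_nil hy, List.foldl_nil]
    rw [if_pos (Or.inl hy)]
  · by_cases hx : ((image.headI).length : Int) - (kernel.headI).length + 1 ≤ 0
    · rw [convolution2d, convolution2d_alt]
      rw [if_pos (Or.inr hx)]
      simp only [PySem.List.pyRange_one_eq_nil hx, List.foldl_nil]
      exact PySem.List.foldl_ignore _ _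
    · have hMY : kernel.length ≤ image.length := by omega
      have hNX : (kernel.headI).length ≤ (image.headI).length := by omega
      by_cases hN : (kernel.headI).length = 0
      · -- zero-width kernel: every window sum is 0, both sides return 0
        have hA0 : convolution2d image kernel = 0 := by
          simp only [convolution2d]
          apply foldl_preserve_zero
          intro i _
          apply foldl_preserve_zero
          intro j _
          have hd : dotA ((PySem.List.slice image (some i) (some (i + (kernel.length : Int)))).map
              (fun r => PySem.List.slice r (some j) (some (j + ((kernel.headI).length : Int))))) kernel = 0 := by
            apply dotA_zero_width
            rcases (PySem.List.slice image (some i) (some (i + (kernel.length : Int)))) with _ | ⟨r, rs⟩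
            · rfl
            · simp only [List.map_cons, List.headI_cons, hN, Nat.cast_zero, add_zero]
              have : PySem.List.slice r (some j) (some j) = (r.drop (PySem.List.clampIdx r.length j)).take 0 := by
                cases hj0 : j with
                | _ => simp [PySem.List.slice, PySem.List.clampIdx]
              simp [this]
          rw [hd]
          simp
        have hB0 : convolution2d_alt image kernel = 0 := by
          simp only [convolution2d_alt]
          rw [if_neg (by omega :
            ¬((image.length : Int) - kernel.length + 1 ≤ 0 ∨
              ((image.headI).length : Int) - (kernel.headI).length + 1 ≤ 0))]
          have hacc : (PySem.List.enumerate kernel 0).foldl (fun acc pa =>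
              (PySem.List.enumerate (PySem.List.slice pa.2 none (some ((kernel.headI).length : Int))) 0).foldl (fun acc pb =>
                acc.mapIdx (fun i row => row.mapIdx (fun j v =>
                  v + PySem.List.pyGetD (PySem.List.pyGetD image ((i : Int) + pa.1) []) ((j : Int) + pb.1) 0 * pb.2))) acc)
              ((PySem.List.pyRange 0 ((image.length : Int) - kernel.length + 1) 1).map
                (fun _ => (PySem.List.pyRange 0 (((image.headI).length : Int) - (kernel.headI).length + 1) 1).map (fun _ => (0 : Int))))
              = ((PySem.List.pyRange 0 ((image.length : Int) - kernel.length + 1) 1).map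
                (fun _ => (PySem.List.pyRange 0 (((image.headI).length : Int) - (kernel.headI).length + 1) 1).map (fun _ => (0 : Int)))) := by
            apply PySem.List.foldl_congr_mem' _ _ (fun acc _ => acc) _ ?_ |>.trans (PySem.List.foldl_ignore _ _)
            intro pa _ acc
            rw [hN]
            simp [PySem.List.slice, PySem.List.enumerate_nil]
          rw [hacc]
          rw [List.foldl_map]
          apply foldl_preserve_zero
          intro a _
          rw [List.foldl_map]
          apply foldl_preserve_zero
          intro b _
          simp
        rw [hA0, hB0]
      obtain ⟨hrows, hker⟩ : (∀ r ∈ image, (image.headI).length ≤ r.length) ∧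
          (∀ r ∈ kernel, (kernel.headI).length ≤ r.length) := by
        rcases hdisj with h | h | h | h
        · omega
        · omega
        · omega
        · exact h
      have hyI : (image.length : Int) - kernel.length + 1
          = ((image.length - kernel.length + 1 : Nat) : Int) := by omega
      have hxI : ((image.headI).length : Int) - (kernel.headI).length + 1
          = (((image.headI).length - (kernel.headI).length + 1 : Nat) : Int) := by omega
      have hA : convolution2d image kernel
          = (List.range (image.length - kernel.length + 1)).foldl (fun mx k =>
              (List.range ((image.headI).length - (kernel.headI).length + 1)).foldl (fun mx j =>
                if Sconv image kernel k j > mx then Sconv image kernel k j else mx) mx) 0 := by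
        simp only [convolution2d]
        rw [hyI, hxI, PySem.List.pyRange_zero_nat, PySem.List.pyRange_zero_nat,
          List.foldl_map]
        apply PySem.List.foldl_congr_mem'
        intro k hkmem mx
        have hk : k < image.length - kernel.length + 1 := List.mem_range.mp hkmem
        rw [List.foldl_map]
        apply PySem.List.foldl_congr_mem'
        intro j hjmem mx2
        have hj : j < (image.headI).length - (kernel.headI).length + 1 := List.mem_range.mp hjmem
        have hsub : (PySem.List.slice image (some (k : Int)) (some ((k : Int) + (kernel.length : Int)))).map
              (fun r => PySem.List.slice r (some (j : Int)) (some ((j : Int) + ((kernel.headI).length : Int))))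
            = ((image.drop k).take kernel.length).map (fun r => (r.drop j).take (kernel.headI).length) := by
          rw [PySem.List.slice_natCast_add image k kernel.length]
          apply List.map_congr_left
          intro r _
          exact PySem.List.slice_natCast_add r j (kernel.headI).length
        rw [hsub, dotA_eq_Sconv image kernel k j hM (by omega) (by omega) hrows]
      have hB : convolution2d_alt image kernel
          = (List.range (image.length - kernel.length + 1)).foldl (fun mx k =>
              (List.range ((image.headI).length - (kernel.headI).length + 1)).foldl (fun mx j =>
                if Sconv image kernel k j > mx then Sconv image kernel k j else mx) mx) 0 := by
        simp only [convolution2d_alt]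
        rw [if_neg (by omega :
          ¬((image.length : Int) - kernel.length + 1 ≤ 0 ∨
            ((image.headI).length : Int) - (kernel.headI).length + 1 ≤ 0))]
        rw [hyI, hxI]
        simp only [PySem.List.pyRange_zero_nat, List.map_map, Function.comp_def]
        rw [accEval image kernel _ _ hker, scan_grid]
      rw [hA, hB]

-- ===== VERDICT (by name: the statement is the Claim_ definition above) =====
theorem convolution2d_spec : Claim_equal_convolution2d := by
  intro image kernel _ hpre
  unfold Spec_convolution2d
  exact main_eq image kernel hpre
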